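-- pv_equiv track=rewrite | github.com/Floepke/PianoScript_App | utils/tiny_tool.py | key_class_filter
-- ===== SOURCE A (Python) =====
-- def key_class_filter(key_class: str) -> list[int]:
--     '''
--         Return list of key numbers matching the given class
--         example 'abcdefg' to get all white key numbers (1-88)
--         example 'CDFGA' to get all black key numbers (1-88)
--     '''
--     wanted = set(key_class)
--     out: list[int] = []
--     for key_num in range(1, 88 + 1):
--         pc = (key_num - 1) % 12  # A0-based pitch class
--         if pc in (0, 2, 3, 5, 7, 8, 10):  # naturals
--             pc_char = {0: 'a', 2: 'b', 3: 'c', 5: 'd', 7: 'e', 8: 'f', 10: 'g'}[pc]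
--         else:  # sharps
--             pc_char = {1: 'A', 4: 'C', 6: 'D', 9: 'F', 11: 'G'}[pc]
--         if pc_char in wanted:
--             out.append(key_num)
--     return out
-- ===== SOURCE B (Python) =====
-- def key_class_filter(key_class: str) -> list[int]:
--     '''Index by requested pitch class: for each wanted label, emit its
--     arithmetic progression of key numbers, then sort.'''
--     label_pc = [('a', 0), ('A', 1), ('b', 2), ('c', 3), ('C', 4), ('d', 5),
--                 ('D', 6), ('e', 7), ('f', 8), ('F', 9), ('g', 10), ('G', 11)]
--     wanted = set(key_class)
--     keys: list[int] = []
--     for label, pc in label_pc: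
--         if label in wanted:
--             keys.extend(range(pc + 1, 89, 12))
--     return sorted(keys)
-- ===== Notes on version B (the rewrite author's own statement) =====
-- stated objective: alternative
-- what changed: Instead of scanning all 88 keys and classifying each by pitch class, B iterates the 12 label/pitch-class pairs, emits the arithmetic progression pc+1, pc+13, ... for each wanted label, and sorts the collected keys.
import Mathlib
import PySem

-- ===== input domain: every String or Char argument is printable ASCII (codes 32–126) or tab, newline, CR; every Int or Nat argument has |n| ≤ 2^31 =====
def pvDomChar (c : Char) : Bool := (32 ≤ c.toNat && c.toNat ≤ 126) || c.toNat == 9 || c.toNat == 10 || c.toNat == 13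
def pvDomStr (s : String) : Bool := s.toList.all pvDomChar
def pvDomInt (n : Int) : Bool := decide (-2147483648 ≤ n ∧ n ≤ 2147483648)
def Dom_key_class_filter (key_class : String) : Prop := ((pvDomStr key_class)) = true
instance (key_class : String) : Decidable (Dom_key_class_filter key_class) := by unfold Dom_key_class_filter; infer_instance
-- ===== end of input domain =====

-- B indexes by requested pitch class (one arithmetic progression per wanted label, then one sort)
-- instead of scanning all 88 keys and classifying each; objective: alternative decomposition, same result.

-- ===== PORT A =====
def kcfNaturals : PySem.Dict Int Char :=
  PySem.Dict.mk [(0, 'a'), (2, 'b'), (3, 'c'), (5, 'd'), (7, 'e'), (8, 'f'), (10, 'g')]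
def kcfSharps : PySem.Dict Int Char :=
  PySem.Dict.mk [(1, 'A'), (4, 'C'), (6, 'D'), (9, 'F'), (11, 'G')]

def key_class_filter (key_class : String) : List Int :=
  let wanted : PySem.Set Char := PySem.Set.ofList key_class.toList
  (PySem.List.pyRange 1 89 1).foldl (fun out key_num =>
    let pc := PySem.Int.mod (key_num - 1) 12
    let pc_char :=
      if pc ∈ ([0, 2, 3, 5, 7, 8, 10] : List Int) then
        kcfNaturals.getD pc ' '  -- `{…}[pc]`: KeyError impossible, pc is one of these keys here
      else
        kcfSharps.getD pc ' '    -- likewise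
    if pc_char ∈ wanted then out ++ [key_num] else out) []

-- ===== PORT B =====
def kcfLabelPc : List (Char × Int) :=
  [('a', 0), ('A', 1), ('b', 2), ('c', 3), ('C', 4), ('d', 5),
   ('D', 6), ('e', 7), ('f', 8), ('F', 9), ('g', 10), ('G', 11)]

def key_class_filter_alt (key_class : String) : List Int :=
  let wanted : PySem.Set Char := PySem.Set.ofList key_class.toList
  let keys := kcfLabelPc.foldl (fun keys lp =>
      if lp.1 ∈ wanted then keys ++ PySem.List.pyRange (lp.2 + 1) 89 12 else keys) []
  PySem.List.sorted keys (fun x => x)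

-- ===== PRECONDITION & SPEC =====
def Spec_key_class_filter (key_class : String) (out : List Int) : Prop := out = key_class_filter_alt key_class
instance (key_class : String) (out : List Int) : Decidable (Spec_key_class_filter key_class out) := by unfold Spec_key_class_filter; infer_instance

-- ===== CLAIM (what is proved, stated in full; the proofs are below) =====
def Claim_equal_key_class_filter : Prop := ∀ (key_class : String), Dom_key_class_filter key_class → Spec_key_class_filter key_class (key_class_filter key_class)

-- ===== LEMMAS AND PROOFS =====

-- the label character A assigns to a pitch class
def kcfLabel (pc : Int) : Char :=
  if pc ∈ ([0, 2, 3, 5, 7, 8, 10] : List Int) then kcfNaturals.getD pc ' ' else kcfSharps.getD pc ' '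

-- A is the ascending filter of 1..88 by label membership
theorem kcf_A_eq_filter (kc : String) :
    key_class_filter kc =
      (PySem.List.pyRange 1 89 1).filter
        (fun k => decide (kcfLabel (PySem.Int.mod (k - 1) 12) ∈ kc.toList)) := by
  simp only [key_class_filter]
  simp only [show ∀ pc : Int, (if pc ∈ ([0, 2, 3, 5, 7, 8, 10] : List Int) then
      kcfNaturals.getD pc ' ' else kcfSharps.getD pc ' ') = kcfLabel pc from fun _ => rfl]
  rw [PySem.List.foldl_append_ite_eq_filter
        (fun k => kcfLabel (PySem.Int.mod (k - 1) 12) ∈ PySem.Set.ofList kc.toList)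
        (PySem.List.pyRange 1 89 1) []]
  simp [PySem.Set.mem_ofList]

theorem kcf_foldl_ite_append {α β : Type} (p : α → Prop) [DecidablePred p] (g : α → List β) :
    ∀ (l : List α) (acc : List β),
      l.foldl (fun acc x => if p x then acc ++ g x else acc) acc
        = acc ++ (l.filter (fun x => decide (p x))).flatMap g := by
  intro l
  induction l with
  | nil => simp
  | cons x t ih =>
    intro acc
    by_cases h : p x <;> simp [h, ih, List.append_assoc]

-- B's key list before sorting
def kcfKeys (kc : String) : List Int :=
  (kcfLabelPc.filter (fun lp => decide (lp.1 ∈ kc.toList))).flatMap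
    (fun lp => PySem.List.pyRange (lp.2 + 1) 89 12)

theorem kcf_B_eq_sorted (kc : String) :
    key_class_filter_alt kc = PySem.List.sorted (kcfKeys kc) (fun x => x) := by
  simp only [key_class_filter_alt, kcfKeys]
  rw [kcf_foldl_ite_append (fun lp => lp.1 ∈ PySem.Set.ofList kc.toList)
        (fun lp => PySem.List.pyRange (lp.2 + 1) 89 12) kcfLabelPc []]
  simp [PySem.Set.mem_ofList]

theorem kcf_mem_prog (pc : Int) (h0 : 0 ≤ pc) (h12 : pc < 12) (k : Int) :
    k ∈ PySem.List.pyRange (pc + 1) 89 12 ↔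
      1 ≤ k ∧ k < 89 ∧ PySem.Int.mod (k - 1) 12 = pc := by
  rw [PySem.List.mem_pyRange_iff_of_pos (by norm_num)]
  rw [PySem.Int.mod_eq_emod_of_pos (by norm_num)]
  omega

theorem kcf_label_mem_iff (m : Int) (h0 : 0 ≤ m) (h12 : m < 12) (S : List Char) :
    kcfLabel m ∈ S ↔ ∃ lp ∈ kcfLabelPc, lp.1 ∈ S ∧ lp.2 = m := by
  have hm : m = 0 ∨ m = 1 ∨ m = 2 ∨ m = 3 ∨ m = 4 ∨ m = 5 ∨ m = 6 ∨ m = 7 ∨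
      m = 8 ∨ m = 9 ∨ m = 10 ∨ m = 11 := by omega
  rcases hm with h | h | h | h | h | h | h | h | h | h | h | h <;> subst h <;>
    simp [kcfLabel, kcfLabelPc, kcfNaturals, kcfSharps, PySem.Dict.getD_eq_get?_getD, PySem.Dict.get?_mk_cons]

theorem kcf_mem_keys (kc : String) (k : Int) :
    k ∈ kcfKeys kc ↔
      (1 ≤ k ∧ k < 89) ∧ kcfLabel (PySem.Int.mod (k - 1) 12) ∈ kc.toList := by
  unfold kcfKeys
  simp only [List.mem_flatMap, List.mem_filter, decide_eq_true_eq]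
  constructor
  · rintro ⟨lp, ⟨hlp, hS⟩, hk⟩
    have hb : 0 ≤ lp.2 ∧ lp.2 < 12 := by
      revert hlp; unfold kcfLabelPc; intro hlp
      fin_cases hlp <;> norm_num
    rw [kcf_mem_prog lp.2 hb.1 hb.2] at hk
    refine ⟨⟨hk.1, hk.2.1⟩, ?_⟩
    rw [kcf_label_mem_iff _ (by omega) (by omega)]
    exact ⟨lp, hlp, hS, hk.2.2.symm⟩
  · rintro ⟨⟨h1, h2⟩, hmem⟩
    have hb : 0 ≤ PySem.Int.mod (k - 1) 12 ∧ PySem.Int.mod (k - 1) 12 < 12 := by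
      rw [PySem.Int.mod_eq_emod_of_pos (by norm_num)]; omega
    rw [kcf_label_mem_iff _ hb.1 hb.2] at hmem
    obtain ⟨lp, hlp, hS, heq⟩ := hmem
    refine ⟨lp, ⟨hlp, hS⟩, ?_⟩
    have hlpb : 0 ≤ lp.2 ∧ lp.2 < 12 := by
      revert hlp; unfold kcfLabelPc; intro hlp
      fin_cases hlp <;> norm_num
    rw [kcf_mem_prog lp.2 hlpb.1 hlpb.2]
    exact ⟨h1, h2, heq.symm⟩

theorem kcf_keys_nodup (kc : String) : (kcfKeys kc).Nodup := by
  unfold kcfKeys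
  rw [List.nodup_flatMap]
  constructor
  · intro lp hlp
    have h := List.filter_sublist.subset hlp
    revert h; unfold kcfLabelPc; intro h
    fin_cases h <;> decide
  · refine List.Pairwise.sublist List.filter_sublist ?_
    have hne : kcfLabelPc.Pairwise (fun p q =>
        p.2 ≠ q.2 ∧ 0 ≤ p.2 ∧ p.2 < 12 ∧ 0 ≤ q.2 ∧ q.2 < 12) := by decide
    refine hne.imp ?_
    rintro ⟨p1, p2⟩ ⟨q1, q2⟩ ⟨hpq, hp0, hp12, hq0, hq12⟩ x hx hx'
    rw [kcf_mem_prog p2 hp0 hp12] at hx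
    rw [kcf_mem_prog q2 hq0 hq12] at hx'
    exact hpq (hx.2.2 ▸ hx'.2.2 ▸ rfl)

-- ===== VERDICT (by name: the statement is the Claim_ definition above) =====
theorem key_class_filter_spec : Claim_equal_key_class_filter := by
  intro kc _
  unfold Spec_key_class_filter
  rw [kcf_A_eq_filter, kcf_B_eq_sorted]
  symm
  apply PySem.List.sorted_eq_of_perm_of_pairwise_lt
  · rw [List.perm_ext_iff_of_nodup
      ((PySem.List.nodup_pyRange_one 1 89).filter _) (kcf_keys_nodup kc)]
    intro a
    rw [kcf_mem_keys]
    simp [List.mem_filter, PySem.List.mem_pyRange_one, and_assoc]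
  · exact List.Pairwise.sublist List.filter_sublist (PySem.List.pairwise_lt_pyRange_one 1 89)
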